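-- pv_equiv track=rewrite | github.com/miliar/Code_Jam_Webscraper | solutions_python/solutions_year15_round0_nr1/536.py | solve
-- ===== SOURCE A (Python) =====
-- def solve(S_max, A):
-- 	cpt = 0
-- 	res = 0
--
-- 	for i in range(len(A)):
-- 		if i > cpt + res:
-- 			res = res + (i- (cpt + res))
-- 		cpt += A[i]
--
-- 	return res
-- ===== SOURCE B (Python) =====
-- def solve(S_max, A):
--     # Right-to-left recurrence: the friends needed for a0::rest is
--     # max(0, 1 - a0 + friends(rest)) -- derived from res = max(0, max_i (i - sum(A[:i]))).
--     # The last element never matters (index len-1 is the final check point's level count).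
--     r = 0
--     for x in reversed(A[:-1]):
--         r = max(0, 1 - x + r)
--     return r
-- ===== Notes on version B (the rewrite author's own statement) =====
-- stated objective: alternative
-- what changed: Replaces A's forward simulation tracking a running crowd count cpt and accumulated friends res by a right-to-left recurrence r -> max(0, 1 - x + r) over A without the last element, keeping no count of people at all.
import Mathlib
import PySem

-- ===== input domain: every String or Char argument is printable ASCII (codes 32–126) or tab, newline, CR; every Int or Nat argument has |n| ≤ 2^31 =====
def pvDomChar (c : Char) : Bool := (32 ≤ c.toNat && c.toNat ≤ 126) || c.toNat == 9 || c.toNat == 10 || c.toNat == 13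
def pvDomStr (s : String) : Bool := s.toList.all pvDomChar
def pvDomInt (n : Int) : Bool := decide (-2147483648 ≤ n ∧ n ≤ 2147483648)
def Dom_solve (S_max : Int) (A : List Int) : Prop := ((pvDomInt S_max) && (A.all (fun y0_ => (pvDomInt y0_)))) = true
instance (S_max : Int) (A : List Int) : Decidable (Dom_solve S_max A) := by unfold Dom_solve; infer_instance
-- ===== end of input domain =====

-- B replaces A's forward (cpt, res) simulation by a right-to-left recurrence r ↦ max 0 (1 - x + r)
-- over A without its last element; return value only, no mutation.

-- ===== PORT A =====
def solve (S_max : Int) (A : List Int) : Int :=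
  -- cpt = 0; res = 0; for i in range(len(A)): if i > cpt+res: res += i-(cpt+res); cpt += A[i]
  let st := (PySem.List.pyRange 0 (A.length : Int) 1).foldl
    (fun (st : Int × Int) (i : Int) =>
      let res := if i > st.1 + st.2 then st.2 + (i - (st.1 + st.2)) else st.2
      (st.1 + PySem.List.pyGetD A i 0, res))   -- A[i]: i ∈ range(len(A)) is always in range
    (0, 0)
  st.2

-- ===== PORT B =====
def solve_alt (S_max : Int) (A : List Int) : Int :=
  -- r = 0; for x in reversed(A[:-1]): r = max(0, 1 - x + r); return r
  ((PySem.List.slice A none (some (-1))).reverse).foldl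
    (fun (r : Int) (x : Int) => max 0 (1 - x + r)) 0

-- ===== PRECONDITION & SPEC =====
def Spec_solve (S_max : Int) (A : List Int) (out : Int) : Prop := out = solve_alt S_max A
instance (S_max : Int) (A : List Int) (out : Int) : Decidable (Spec_solve S_max A out) := by unfold Spec_solve; infer_instance

-- ===== CLAIM (what is proved, stated in full; the proofs are below) =====
def Claim_equal_solve : Prop := ∀ (S_max : Int) (A : List Int), Dom_solve S_max A → Spec_solve S_max A (solve S_max A)

-- ===== LEMMAS AND PROOFS =====

-- structural form of A's loop: index j, crowd count c, result r
def pvLA (j c r : Int) : List Int → Int × Int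
  | [] => (c, r)
  | x :: xs => pvLA (j + 1) (c + x) (if j > c + r then r + (j - (c + r)) else r) xs

-- B's foldr value (foldl over the reversed list)
def pvBV (A : List Int) : Int :=
  A.dropLast.foldr (fun x r => max 0 (1 - x + r)) 0

-- A's index fold over range(len A) equals the structural recursion pvLA on the suffix
lemma pvFoldA (tail : List Int) : ∀ (A : List Int) (j : Nat) (c r : Int), A.drop j = tail →
    (PySem.List.pyRange (j : Int) (A.length : Int) 1).foldl
      (fun (st : Int × Int) (i : Int) =>
        (st.1 + PySem.List.pyGetD A i 0,
         if i > st.1 + st.2 then st.2 + (i - (st.1 + st.2)) else st.2))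
      (c, r)
    = pvLA (j : Int) c r tail := by
  induction tail with
  | nil =>
    intro A j c r h
    have hj : A.length ≤ j := by
      by_contra hlt
      have := List.drop_eq_nil_iff.mp h
      omega
    rw [PySem.List.pyRange_one_eq_nil (by exact_mod_cast hj)]
    simp [pvLA]
  | cons x xs ih =>
    intro A j c r h
    have hj : j < A.length := by
      by_contra hge
      rw [List.drop_eq_nil_of_le (by omega)] at h
      simp at h
    have hget : PySem.List.pyGetD A ((j : Nat) : Int) 0 = A[j] := by
      rw [PySem.List.pyGetD_natCast, List.getD_eq_getElem _ _ hj]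
    have hx : A[j] = x := by
      have := List.drop_eq_getElem_cons hj
      rw [h] at this
      exact (List.cons.injEq _ _ _ _ ▸ this).1.symm
    rw [PySem.List.pyRange_one_cons (by exact_mod_cast hj)]
    rw [List.foldl_cons]
    simp only [hget, hx]
    have hdrop : A.drop (j + 1) = xs := by
      have := List.drop_eq_getElem_cons hj
      rw [h, hx] at this
      exact (List.cons.injEq _ _ _ _ ▸ this).2.symm
    have hcast : (((j + 1 : Nat)) : Int) = (j : Int) + 1 := by push_cast; ring
    have := ih A (j + 1) (c + x) (if (j : Int) > c + r then r + ((j : Int) - (c + r)) else r) hdrop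
    rw [hcast] at this
    rw [this, pvLA]

-- the branch update is a max, and pvLA's result is the generalized right-to-left value
lemma pvLA_eq_bv (xs : List Int) : ∀ (j c r : Int),
    (pvLA j c r xs).2 =
      if xs = [] then r
      else max r ((j - c) + xs.dropLast.foldr (fun x r => max 0 (1 - x + r)) 0) := by
  induction xs with
  | nil => intro j c r; simp [pvLA]
  | cons x xs ih =>
    intro j c r
    rw [pvLA, ih]
    have hbr : (if j > c + r then r + (j - (c + r)) else r) = max r (j - c) := by
      split_ifs with h <;> omega
    rw [hbr]
    cases xs with
    | nil => simp
    | cons y ys =>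
      rw [if_neg (by simp), if_neg (by simp), List.dropLast_cons₂, List.foldr_cons]
      omega

lemma pvBV_nonneg (l : List Int) : 0 ≤ l.foldr (fun x r => max 0 (1 - x + r)) 0 := by
  cases l with
  | nil => simp
  | cons x xs => simp [List.foldr_cons]

-- ===== VERDICT (by name: the statement is the Claim_ definition above) =====
theorem solve_spec : Claim_equal_solve := by
  intro S_max A _
  show solve S_max A = solve_alt S_max A
  unfold solve solve_alt
  rw [PySem.List.slice_to_neg_one, List.foldl_reverse]
  have h0 := pvFoldA A A 0 0 0 (by simp)
  simp only [Nat.cast_zero] at h0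
  rw [h0, pvLA_eq_bv]
  cases A with
  | nil => simp
  | cons x xs =>
    have hne : (x :: xs) ≠ [] := by simp
    rw [if_neg hne]
    have := pvBV_nonneg (x :: xs).dropLast
    omega
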